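-- pv_equiv track=rewrite | github.com/Louw115/neurop-forge | neurop_forge/sources/datetime_math.py | workdays_between
-- ===== SOURCE A (Python) =====
-- def is_leap_year(year: int) -> bool:
--     """Check if year is a leap year."""
--     return year % 4 == 0 and (year % 100 != 0 or year % 400 == 0)
--
-- def days_in_month(year: int, month: int) -> int:
--     """Get number of days in a month."""
--     days = [31, 28, 31, 30, 31, 30, 31, 31, 30, 31, 30, 31]
--     if month == 2 and is_leap_year(year):
--         return 29
--     return days[month - 1] if 1 <= month <= 12 else 0
--
-- def days_in_year(year: int) -> int:
--     """Get number of days in a year."""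
--     return 366 if is_leap_year(year) else 365
--
-- def day_of_week(year: int, month: int, day: int) -> int:
--     """Get day of week (0=Monday, 6=Sunday) using Zeller's formula."""
--     if month < 3:
--         month += 12
--         year -= 1
--     k = year % 100
--     j = year // 100
--     h = (day + (13 * (month + 1)) // 5 + k + k // 4 + j // 4 - 2 * j) % 7
--     return (h + 5) % 7
--
-- def add_days(year: int, month: int, day: int, days_to_add: int) -> dict:
--     """Add days to a date."""
--     total_days = day + days_to_add
--     while total_days > days_in_month(year, month):
--         total_days -= days_in_month(year, month)
--         month += 1
--         if month > 12:
--             month = 1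
--             year += 1
--     while total_days < 1:
--         month -= 1
--         if month < 1:
--             month = 12
--             year -= 1
--         total_days += days_in_month(year, month)
--     return {"year": year, "month": month, "day": total_days}
--
-- def days_between(y1: int, m1: int, d1: int, y2: int, m2: int, d2: int) -> int:
--     """Calculate days between two dates."""
--     def to_days(y, m, d):
--         days = d
--         for year in range(1, y):
--             days += days_in_year(year)
--         for month in range(1, m):
--             days += days_in_month(y, month)
--         return days
--     return to_days(y2, m2, d2) - to_days(y1, m1, d1)
--
-- def is_weekend(year: int, month: int, day: int) -> bool:
--     """Check if date is a weekend."""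
--     dow = day_of_week(year, month, day)
--     return dow >= 5
--
-- def is_weekday(year: int, month: int, day: int) -> bool:
--     """Check if date is a weekday."""
--     return not is_weekend(year, month, day)
--
-- def workdays_between(y1: int, m1: int, d1: int, y2: int, m2: int, d2: int) -> int:
--     """Count workdays between two dates."""
--     count = 0
--     current = {"year": y1, "month": m1, "day": d1}
--     end = {"year": y2, "month": m2, "day": d2}
--     while days_between(current["year"], current["month"], current["day"],
--                        end["year"], end["month"], end["day"]) > 0:
--         if is_weekday(current["year"], current["month"], current["day"]):
--             count += 1
--         current = add_days(current["year"], current["month"], current["day"], 1)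
--     return count
-- ===== SOURCE B (Python) =====
-- # Same return value as A on its sensible domain, but O(1): a closed-form date ordinal
-- # (matching A's to_days arithmetic) + arithmetic weekday counting instead of a
-- # day-by-day walk that recomputes a year-by-year ordinal at every step.
--
-- _CUM = [0, 31, 59, 90, 120, 151, 181, 212, 243, 273, 304, 334, 365]
--
-- def _ordinal(y, m, d):
--     # closed form of A's day-number arithmetic: months are clamped into [1, 13]
--     # and years below 1 contribute no days
--     mm = min(max(m, 1), 13)
--     mp = _CUM[mm - 1] + (1 if mm > 2 and y % 4 == 0 and (y % 100 != 0 or y % 400 == 0) else 0)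
--     ys = 365 * (y - 1) + (y - 1) // 4 - (y - 1) // 100 + (y - 1) // 400 if y >= 1 else 0
--     return d + mp + ys
--
-- def workdays_between(y1: int, m1: int, d1: int, y2: int, m2: int, d2: int) -> int:
--     o1 = _ordinal(y1, m1, d1)
--     o2 = _ordinal(y2, m2, d2)
--     n = o2 - o1
--     if n <= 0:
--         return 0
--     w = (o1 - 1) % 7  # 0 = Monday
--     return 5 * (n // 7) + sum(1 for k in range(n % 7) if (w + k) % 7 < 5)
-- ===== Notes on version B (the rewrite author's own statement) =====
-- stated objective: faster
-- what changed: Replaces the day-by-day walk (which recalls a year-by-year ordinal computation for every single day) with a closed-form date ordinal plus O(1) arithmetic counting of weekdays in the span, using the fact that the weekday of a valid date is its ordinal minus one mod 7.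
-- outside the precondition, e.g. on workdays_between(2, 0, 5, 2, 1, 30): A returns 18, B returns 17; on workdays_between(0, 1, 1, 1, 1, 5): A returns 2, B returns 4
import Mathlib
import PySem

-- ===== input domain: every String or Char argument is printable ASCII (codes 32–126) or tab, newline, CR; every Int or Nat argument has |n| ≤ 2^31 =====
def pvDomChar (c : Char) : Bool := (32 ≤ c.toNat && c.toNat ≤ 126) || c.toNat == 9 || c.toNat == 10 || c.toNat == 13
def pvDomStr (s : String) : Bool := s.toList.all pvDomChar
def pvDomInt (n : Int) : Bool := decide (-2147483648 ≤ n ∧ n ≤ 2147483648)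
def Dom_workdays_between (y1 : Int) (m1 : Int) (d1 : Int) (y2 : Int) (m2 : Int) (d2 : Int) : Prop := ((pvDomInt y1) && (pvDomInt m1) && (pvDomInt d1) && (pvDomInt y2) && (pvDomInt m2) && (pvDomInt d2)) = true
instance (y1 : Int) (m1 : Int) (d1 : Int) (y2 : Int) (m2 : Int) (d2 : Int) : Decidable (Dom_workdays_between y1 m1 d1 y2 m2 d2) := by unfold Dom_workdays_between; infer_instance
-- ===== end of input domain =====

-- B replaces A's day-by-day walk (each day re-deriving a year-by-year date ordinal) by a
-- closed-form date ordinal and O(1) arithmetic weekday counting (objective: faster).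

-- ===== PORT A =====
-- Python '%' and '//' are ported as PySem.Int.mod / PySem.Int.floordiv (floor semantics, exact).

def is_leap_year (year : Int) : Bool :=
  PySem.Int.mod year 4 == 0 && (PySem.Int.mod year 100 != 0 || PySem.Int.mod year 400 == 0)

def days_in_month (year : Int) (month : Int) : Int :=
  let days : List Int := [31, 28, 31, 30, 31, 30, 31, 31, 30, 31, 30, 31]
  if month == 2 && is_leap_year year then 29
  else if 1 ≤ month ∧ month ≤ 12 then PySem.List.pyGetD days (month - 1) 0 else 0
  -- 'days[month - 1]': the guard puts the index in range, so the default of pyGetD is unreachable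

def days_in_year (year : Int) : Int := if is_leap_year year then 366 else 365

def day_of_week (year : Int) (month : Int) (day : Int) : Int :=
  let p := if month < 3 then (month + 12, year - 1) else (month, year)
  let month := p.1
  let year := p.2
  let k := PySem.Int.mod year 100
  let j := PySem.Int.floordiv year 100
  let h := PySem.Int.mod (day + PySem.Int.floordiv (13 * (month + 1)) 5 + k +
            PySem.Int.floordiv k 4 + PySem.Int.floordiv j 4 - 2 * j) 7
  PySem.Int.mod (h + 5) 7

-- first 'while' of add_days; the fuel only makes the recursion structural (it bounds the
-- iteration count: each iteration removes ≥ 28 from total_days at a valid month, or moves an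
-- out-of-range month one step toward the valid range / wraps it)
def add_days_loop1 : Nat → Int → Int → Int → Int × Int × Int
  | 0, year, month, t => (year, month, t)
  | fuel + 1, year, month, t =>
    if t > days_in_month year month then
      let t := t - days_in_month year month
      let month := month + 1
      if month > 12 then add_days_loop1 fuel (year + 1) 1 t
      else add_days_loop1 fuel year month t
    else (year, month, t)

-- second 'while' of add_days (same fuel remark)
def add_days_loop2 : Nat → Int → Int → Int → Int × Int × Int
  | 0, year, month, t => (year, month, t)
  | fuel + 1, year, month, t =>
    if t < 1 then
      let month := month - 1
      if month < 1 then add_days_loop2 fuel (year - 1) 12 (t + days_in_month (year - 1) 12)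
      else add_days_loop2 fuel year month (t + days_in_month year month)
    else (year, month, t)

-- the returned dict {"year","month","day"} is represented as a (year, month, day) triple
def add_days (year : Int) (month : Int) (day : Int) (days_to_add : Int) : Int × Int × Int :=
  let t := day + days_to_add
  let s1 := add_days_loop1 (t.natAbs + month.natAbs + 64) year month t
  add_days_loop2 (s1.2.2.natAbs + s1.2.1.natAbs + 64) s1.1 s1.2.1 s1.2.2

def to_days (y : Int) (m : Int) (d : Int) : Int :=
  let days := (PySem.List.pyRange 1 y 1).foldl (fun acc year => acc + days_in_year year) d
  (PySem.List.pyRange 1 m 1).foldl (fun acc month => acc + days_in_month y month) days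

def days_between (y1 m1 d1 y2 m2 d2 : Int) : Int := to_days y2 m2 d2 - to_days y1 m1 d1

def is_weekend (year month day : Int) : Bool := day_of_week year month day ≥ 5

def is_weekday (year month day : Int) : Bool := !(is_weekend year month day)

-- the main 'while' loop of workdays_between, with fuel (it only makes the recursion
-- structural: on the admitted inputs the loop runs at most max(days_between, 0) times)
def wb_loop : Nat → Int → Int × Int × Int → Int → Int → Int → Int
  | 0, count, _, _, _, _ => count
  | fuel + 1, count, cur, ey, em, ed =>
    if days_between cur.1 cur.2.1 cur.2.2 ey em ed > 0 then
      let count := if is_weekday cur.1 cur.2.1 cur.2.2 then count + 1 else count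
      wb_loop fuel count (add_days cur.1 cur.2.1 cur.2.2 1) ey em ed
    else count

def workdays_between (y1 : Int) (m1 : Int) (d1 : Int) (y2 : Int) (m2 : Int) (d2 : Int) : Int :=
  wb_loop (2 ^ 60) 0 (y1, m1, d1) y2 m2 d2

-- ===== PORT B =====

def pvCum : List Int := [0, 31, 59, 90, 120, 151, 181, 212, 243, 273, 304, 334, 365]

def pvOrdinal (y : Int) (m : Int) (d : Int) : Int :=
  let mm := min (max m 1) 13
  let mp := PySem.List.pyGetD pvCum (mm - 1) 0 + (if 2 < mm && (PySem.Int.mod y 4 == 0 && (PySem.Int.mod y 100 != 0 || PySem.Int.mod y 400 == 0)) then 1 else 0)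
  let ys := if 1 ≤ y then
      365 * (y - 1) + PySem.Int.floordiv (y - 1) 4 - PySem.Int.floordiv (y - 1) 100 +
        PySem.Int.floordiv (y - 1) 400
    else 0
  d + mp + ys

def workdays_between_alt (y1 : Int) (m1 : Int) (d1 : Int) (y2 : Int) (m2 : Int) (d2 : Int) : Int :=
  let o1 := pvOrdinal y1 m1 d1
  let o2 := pvOrdinal y2 m2 d2
  let n := o2 - o1
  if n ≤ 0 then 0
  else
    let w := PySem.Int.mod (o1 - 1) 7
    5 * PySem.Int.floordiv n 7 +
      (PySem.List.pyRange 0 (PySem.Int.mod n 7) 1).foldl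
        (fun acc k => acc + (if PySem.Int.mod (w + k) 7 < 5 then 1 else 0)) 0

-- ===== PRECONDITION & SPEC =====

def pvDim (y : Int) (m : Int) : Int :=
  if m = 2 then (if y % 4 = 0 ∧ (y % 100 ≠ 0 ∨ y % 400 = 0) then 29 else 28)
  else if m = 4 ∨ m = 6 ∨ m = 9 ∨ m = 11 then 30 else 31

def pvValidDate (y m d : Int) : Prop := 1 ≤ y ∧ 1 ≤ m ∧ m ≤ 12 ∧ 1 ≤ d ∧ d ≤ pvDim y m

-- Pre_ admits every input whose end point does not lie strictly after the start point under
-- A's date ordinal (there A returns 0 at once), and otherwise requires both end points to be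
-- genuine calendar dates with positive years: on non-dates or non-positive years A's raw
-- Zeller flag and its year-collapsing ordinal (years ≤ 0 contribute no days) yield accidental
-- values, or the day-by-day walk becomes practically non-terminating.
def Pre_workdays_between (y1 : Int) (m1 : Int) (d1 : Int) (y2 : Int) (m2 : Int) (d2 : Int) : Prop :=
  pvOrdinal y2 m2 d2 ≤ pvOrdinal y1 m1 d1 ∨
    (pvValidDate y1 m1 d1 ∧ pvValidDate y2 m2 d2)

instance (y1 : Int) (m1 : Int) (d1 : Int) (y2 : Int) (m2 : Int) (d2 : Int) :
    Decidable (Pre_workdays_between y1 m1 d1 y2 m2 d2) := by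
  unfold Pre_workdays_between pvValidDate; infer_instance

def pvWitness_workdays_between : Int × Int × Int × Int × Int × Int := (2023, 5, 10, 2023, 5, 20)

def Spec_workdays_between (y1 : Int) (m1 : Int) (d1 : Int) (y2 : Int) (m2 : Int) (d2 : Int) (out : Int) : Prop := out = workdays_between_alt y1 m1 d1 y2 m2 d2
instance (y1 : Int) (m1 : Int) (d1 : Int) (y2 : Int) (m2 : Int) (d2 : Int) (out : Int) : Decidable (Spec_workdays_between y1 m1 d1 y2 m2 d2 out) := by unfold Spec_workdays_between; infer_instance

-- ===== CLAIM (what is proved, stated in full; the proofs are below) =====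
def Claim_equal_workdays_between : Prop := ∀ (y1 : Int) (m1 : Int) (d1 : Int) (y2 : Int) (m2 : Int) (d2 : Int), Dom_workdays_between y1 m1 d1 y2 m2 d2 → Pre_workdays_between y1 m1 d1 y2 m2 d2 → Spec_workdays_between y1 m1 d1 y2 m2 d2 (workdays_between y1 m1 d1 y2 m2 d2)

-- ===== LEMMAS AND PROOFS =====

-- proof-side helpers: pvMP = cumulative days before a (clamped) month, pvYS = days of the
-- complete years before year y, pvW w n = number of weekdays among n consecutive days whose
-- first day has day-of-week w (0 = Monday, modulo 7)
def pvMP (y m : Int) : Int := PySem.List.pyGetD pvCum (m - 1) 0 + (if 2 < m && is_leap_year y then 1 else 0)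
def pvYS (y : Int) : Int := if 1 ≤ y then 365*(y-1) + (y-1)/4 - (y-1)/100 + (y-1)/400 else 0

theorem pvfd4 (a : Int) : PySem.Int.floordiv a 4 = a / 4 := PySem.Int.floordiv_eq_ediv_of_pos (by norm_num)
theorem pvfd100 (a : Int) : PySem.Int.floordiv a 100 = a / 100 := PySem.Int.floordiv_eq_ediv_of_pos (by norm_num)
theorem pvfd400 (a : Int) : PySem.Int.floordiv a 400 = a / 400 := PySem.Int.floordiv_eq_ediv_of_pos (by norm_num)
theorem pvfd5 (a : Int) : PySem.Int.floordiv a 5 = a / 5 := PySem.Int.floordiv_eq_ediv_of_pos (by norm_num)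
theorem pvfd7 (a : Int) : PySem.Int.floordiv a 7 = a / 7 := PySem.Int.floordiv_eq_ediv_of_pos (by norm_num)
theorem pvmd4 (a : Int) : PySem.Int.mod a 4 = a % 4 := PySem.Int.mod_eq_emod_of_pos (by norm_num)
theorem pvmd100 (a : Int) : PySem.Int.mod a 100 = a % 100 := PySem.Int.mod_eq_emod_of_pos (by norm_num)
theorem pvmd400 (a : Int) : PySem.Int.mod a 400 = a % 400 := PySem.Int.mod_eq_emod_of_pos (by norm_num)
theorem pvmd7 (a : Int) : PySem.Int.mod a 7 = a % 7 := PySem.Int.mod_eq_emod_of_pos (by norm_num)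

theorem leap_iff (y : Int) : is_leap_year y = true ↔ (y % 4 = 0 ∧ (y % 100 ≠ 0 ∨ y % 400 = 0)) := by
  simp [is_leap_year, pvmd4, pvmd100, pvmd400]

theorem pvOrdinal_eq (y m d : Int) : pvOrdinal y m d = d + pvMP y (min (max m 1) 13) + pvYS y := by
  simp only [pvOrdinal, pvMP, pvYS, is_leap_year, pvfd4, pvfd100, pvfd400]
  rfl

theorem dim_eq (y m : Int) (h1 : 1 ≤ m) (h2 : m ≤ 12) : days_in_month y m = pvDim y m := by
  interval_cases m <;>
    first
      | (simp [days_in_month, pvDim]; decide)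
      | (by_cases h : y % 4 = 0 ∧ (y % 100 ≠ 0 ∨ y % 400 = 0)
         · simp [days_in_month, (leap_iff y).mpr h]
           unfold pvDim
           split_ifs <;> first | rfl | omega | tauto
         · have hb : is_leap_year y = false := by
             rcases Bool.eq_false_or_eq_true (is_leap_year y) with e | e
             · exact absurd ((leap_iff y).mp e) h
             · exact e
           simp [days_in_month, hb]
           unfold pvDim
           split_ifs <;> first | decide | omega | tauto)

theorem dim_zero (y m : Int) (h : 13 ≤ m) : days_in_month y m = 0 := by
  have h2 : (m == 2) = false := by simp; omega
  simp [days_in_month, h2]; omega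

theorem yearfold (d : Int) : ∀ (n : Nat),
    (PySem.List.pyRange 1 ((n : Int) + 1) 1).foldl (fun acc yr => acc + days_in_year yr) d
      = d + 365 * (n : Int) + (n : Int) / 4 - (n : Int) / 100 + (n : Int) / 400 := by
  intro n
  induction n with
  | zero => rw [PySem.List.pyRange_one_eq_nil (by omega)]; simp [pvYS]
  | succ k ih =>
    rw [show ((k + 1 : Nat) : Int) + 1 = ((k : Int) + 1) + 1 by push_cast; ring,
      PySem.List.pyRange_one_succ_right (by omega), List.foldl_append, ih]
    simp only [List.foldl, days_in_year]
    by_cases hL : is_leap_year ((k : Int) + 1) = true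
    · rw [if_pos hL]
      have := (leap_iff _).mp hL
      push_cast
      omega
    · rw [if_neg hL]
      have : ¬ (((k : Int) + 1) % 4 = 0 ∧ (((k : Int) + 1) % 100 ≠ 0 ∨ ((k : Int) + 1) % 400 = 0)) :=
        fun h => hL ((leap_iff _).mpr h)
      push_cast
      omega

theorem yearfold' (d y : Int) :
    (PySem.List.pyRange 1 y 1).foldl (fun acc yr => acc + days_in_year yr) d = d + pvYS y := by
  rcases (show y ≤ 1 ∨ 1 < y by omega) with h | h
  · rw [PySem.List.pyRange_one_eq_nil h]
    simp only [List.foldl, pvYS]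
    split <;> omega
  · obtain ⟨n, rfl⟩ : ∃ n : Nat, y = (n : Int) + 1 := ⟨(y - 1).toNat, by omega⟩
    rw [yearfold]
    simp only [pvYS]
    rw [if_pos (by omega)]
    omega

theorem mp_step (y m : Int) (h1 : 1 ≤ m) (h2 : m ≤ 12) :
    pvMP y (m + 1) = pvMP y m + pvDim y m := by
  interval_cases m <;>
    first
      | (simp [pvMP, pvDim]; first | decide | (split <;> decide))
      | (by_cases h : y % 4 = 0 ∧ (y % 100 ≠ 0 ∨ y % 400 = 0)
         · simp [pvMP, (leap_iff y).mpr h]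
           unfold pvDim
           split_ifs <;> first | decide | omega | tauto
         · have hb : is_leap_year y = false := by
             rcases Bool.eq_false_or_eq_true (is_leap_year y) with e | e
             · exact absurd ((leap_iff y).mp e) h
             · exact e
           simp [pvMP, hb]
           unfold pvDim
           split_ifs <;> first | decide | omega | tauto)

theorem mp_one (y : Int) : pvMP y 1 = 0 := by
  simp [pvMP, pvCum, PySem.List.pyGetD_zero_cons]

theorem foldl_addzero (l : List Int) (D : Int) (g : Int → Int) (h : ∀ x ∈ l, g x = 0) :
    l.foldl (fun a x => a + g x) D = D := by
  induction l generalizing D <;> simp_all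

theorem monthfold_nat (y D : Int) : ∀ n : Nat, n ≤ 12 →
    (PySem.List.pyRange 1 ((n : Int) + 1) 1).foldl (fun acc mo => acc + days_in_month y mo) D
      = D + pvMP y ((n : Int) + 1) := by
  intro n
  induction n with
  | zero =>
    intro _
    rw [PySem.List.pyRange_one_eq_nil (by omega)]
    simp only [List.foldl, Nat.cast_zero, zero_add, mp_one]
    omega
  | succ k ih =>
    intro hk
    rw [show ((k + 1 : Nat) : Int) + 1 = ((k : Int) + 1) + 1 by push_cast; ring,
      PySem.List.pyRange_one_succ_right (by omega), List.foldl_append, ih (by omega)]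
    simp only [List.foldl]
    rw [dim_eq y ((k : Int) + 1) (by omega) (by omega),
      mp_step y ((k : Int) + 1) (by omega) (by omega)]
    ring

theorem monthfold (y D m : Int) :
    (PySem.List.pyRange 1 m 1).foldl (fun acc mo => acc + days_in_month y mo) D
      = D + pvMP y (min (max m 1) 13) := by
  rcases (show m ≤ 1 ∨ (1 < m ∧ m ≤ 13) ∨ 13 < m by omega) with h | ⟨h1, h2⟩ | h
  · rw [PySem.List.pyRange_one_eq_nil h, max_eq_right h, min_eq_left (by omega : (1:Int) ≤ 13),
      mp_one]
    simp only [List.foldl]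
    omega
  · obtain ⟨n, rfl⟩ : ∃ n : Nat, m = (n : Int) + 1 := ⟨(m - 1).toNat, by omega⟩
    rw [monthfold_nat y D n (by omega), max_eq_left (by omega), min_eq_left (by omega)]
  · rw [PySem.List.pyRange_one_append 1 13 m (by omega) (by omega), List.foldl_append,
      max_eq_left (by omega), min_eq_right (by omega)]
    have h13 : (PySem.List.pyRange 1 13 1).foldl (fun acc mo => acc + days_in_month y mo) D
        = D + pvMP y 13 := by
      have h := monthfold_nat y D 12 (by omega)
      norm_num at h
      exact h
    rw [h13, foldl_addzero _ _ _ (fun x hx => dim_zero y x (by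
        have := (PySem.List.mem_pyRange_one).mp hx
        omega))]

theorem to_days_eq (y m d : Int) : to_days y m d = pvOrdinal y m d := by
  rw [pvOrdinal_eq]
  unfold to_days
  rw [yearfold', monthfold]
  ring

theorem leap400 (y : Int) : is_leap_year (y - 400) = is_leap_year y := by
  rcases Bool.eq_false_or_eq_true (is_leap_year y) with h | h <;>
    rcases Bool.eq_false_or_eq_true (is_leap_year (y - 400)) with h2 | h2 <;>
    rw [h, h2] <;>
    first
      | rfl
      | (exfalso
         have a1 := leap_iff y
         have a2 := leap_iff (y - 400)
         rw [h] at a1; rw [h2] at a2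
         simp only [Bool.false_eq_true, false_iff, true_iff] at a1 a2
         omega)

theorem dow400 (y m : Int) (hy : 400 < y) :
    day_of_week y m 1 = day_of_week (y - 400) m 1 := by
  unfold day_of_week
  by_cases h : m < 3
  · simp only [h, if_pos, pvfd4, pvfd100, pvfd5, pvmd100, pvmd7]
    have e1 : (y - 400 - 1) % 100 = (y - 1) % 100 := by omega
    have e2 : (y - 400 - 1) / 100 = (y - 1) / 100 - 4 := by omega
    rw [e1, e2]
    have e3 : ((y - 1) / 100 - 4) / 4 = (y - 1) / 100 / 4 - 1 := by omega
    rw [e3]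
    omega
  · simp only [h, if_neg, not_false_iff, pvfd4, pvfd100, pvfd5, pvmd100, pvmd7]
    have e1 : (y - 400) % 100 = y % 100 := by omega
    have e2 : (y - 400) / 100 = y / 100 - 4 := by omega
    rw [e1, e2]
    have e3 : (y / 100 - 4) / 4 = y / 100 / 4 - 1 := by omega
    rw [e3]
    omega

theorem ord400 (y m : Int) (hy : 400 < y) :
    pvOrdinal y m 1 = pvOrdinal (y - 400) m 1 + 146097 := by
  have mp400 : pvMP (y - 400) (min (max m 1) 13) = pvMP y (min (max m 1) 13) := by
    unfold pvMP; rw [leap400]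
  rw [pvOrdinal_eq, pvOrdinal_eq, mp400]
  have : pvYS y = pvYS (y - 400) + 146097 := by
    unfold pvYS
    rw [if_pos (by omega), if_pos (by omega)]
    omega
  omega

set_option maxRecDepth 100000 in
set_option maxHeartbeats 2000000 in
theorem zeller_base : ∀ a : Nat, a < 400 → ∀ b : Nat, b < 12 →
    day_of_week ((a : Int) + 1) ((b : Int) + 1) 1 = (pvOrdinal ((a : Int) + 1) ((b : Int) + 1) 1 - 1) % 7 := by
  decide

theorem int_period_ind (P : Int → Prop) (base : ∀ y : Int, 1 ≤ y → y ≤ 400 → P y)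
    (step : ∀ y : Int, 400 < y → P (y - 400) → P y) : ∀ y : Int, 1 ≤ y → P y := by
  intro y hy
  obtain ⟨n, rfl⟩ : ∃ n : Nat, y = (n : Int) + 1 := ⟨(y - 1).toNat, by omega⟩
  clear hy
  induction n using Nat.strong_induction_on with
  | _ n ih =>
    rcases (show (n : Int) + 1 ≤ 400 ∨ 400 < (n : Int) + 1 by omega) with h | h
    · exact base _ (by omega) h
    · have hk := ih (n - 400) (by omega)
      have he : ((n - 400 : Nat) : Int) + 1 = (n : Int) + 1 - 400 := by omega
      rw [he] at hk
      exact step _ h hk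

theorem zeller_one (y m : Int) (hy : 1 ≤ y) (hm1 : 1 ≤ m) (hm2 : m ≤ 12) :
    day_of_week y m 1 = (pvOrdinal y m 1 - 1) % 7 := by
  refine int_period_ind (fun z => day_of_week z m 1 = (pvOrdinal z m 1 - 1) % 7) ?_ ?_ y hy
  · intro y h1 h2
    obtain ⟨a, rfl⟩ : ∃ a : Nat, y = (a : Int) + 1 := ⟨(y - 1).toNat, by omega⟩
    obtain ⟨b, rfl⟩ : ∃ b : Nat, m = (b : Int) + 1 := ⟨(m - 1).toNat, by omega⟩
    exact zeller_base a (by omega) b (by omega)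
  · intro y h ih
    rw [dow400 y m h, ih, ord400 y m h]
    omega

theorem zeller_d_shift (y m d : Int) :
    day_of_week y m d = (day_of_week y m 1 + (d - 1)) % 7 := by
  unfold day_of_week
  by_cases h : m < 3 <;>
    simp only [h, if_pos, if_neg, not_false_iff, pvfd4, pvfd100, pvfd5, pvmd100, pvmd7] <;>
    omega

theorem ord_d_shift (y m d : Int) : pvOrdinal y m d = pvOrdinal y m 1 + (d - 1) := by
  rw [pvOrdinal_eq, pvOrdinal_eq]; ring

theorem zeller_eq (y m d : Int) (hv : pvValidDate y m d) :
    day_of_week y m d = (pvOrdinal y m d - 1) % 7 := by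
  obtain ⟨hy, hm1, hm2, _, _⟩ := hv
  rw [zeller_d_shift, zeller_one y m hy hm1 hm2]
  conv_rhs => rw [ord_d_shift y m d]
  omega

theorem weekday_eq (y m d : Int) (hv : pvValidDate y m d) :
    is_weekday y m d = decide ((pvOrdinal y m d - 1) % 7 < 5) := by
  simp only [is_weekday, is_weekend, zeller_eq y m d hv, ← decide_not]
  exact decide_eq_decide.mpr (by omega)

theorem loop1_exit (f : Nat) (y m t : Int) (h : ¬ t > days_in_month y m) :
    add_days_loop1 f y m t = (y, m, t) := by
  cases f with
  | zero => rfl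
  | succ f => simp [add_days_loop1, h]

theorem loop2_exit (f : Nat) (y m t : Int) (h : ¬ t < 1) :
    add_days_loop2 f y m t = (y, m, t) := by
  cases f with
  | zero => rfl
  | succ f => simp [add_days_loop2, h]

theorem dim_ge (y m : Int) (h1 : 1 ≤ m) (h2 : m ≤ 12) : 28 ≤ pvDim y m := by
  unfold pvDim; split_ifs <;> omega

theorem mp_twelve (y : Int) : pvMP y 12 = 334 + (if is_leap_year y = true then 1 else 0) := by
  simp [pvMP, pvCum, PySem.List.pyGetD_ofNat']

theorem ys_succ (y : Int) (hy : 1 ≤ y) :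
    pvYS (y + 1) = pvYS y + 365 + (if is_leap_year y = true then 1 else 0) := by
  unfold pvYS
  rw [if_pos (by omega), if_pos (by omega)]
  have hiff := leap_iff y
  cases hL : is_leap_year y <;> rw [hL] at hiff <;>
    simp only [Bool.false_eq_true, false_iff, true_iff] at hiff <;>
    norm_num <;> omega

theorem add_days_one (y m d : Int) (hv : pvValidDate y m d) :
    pvValidDate (add_days y m d 1).1 (add_days y m d 1).2.1 (add_days y m d 1).2.2 ∧
      pvOrdinal (add_days y m d 1).1 (add_days y m d 1).2.1 (add_days y m d 1).2.2
        = pvOrdinal y m d + 1 := by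
  obtain ⟨hy, hm1, hm2, hd1, hd2⟩ := hv
  have hdim := dim_eq y m hm1 hm2
  have hge := dim_ge y m hm1 hm2
  rcases (show d < pvDim y m ∨ (d = pvDim y m ∧ m < 12) ∨ (d = pvDim y m ∧ m = 12) by omega)
    with hc | ⟨hc, hm⟩ | ⟨hc, hm⟩
  · -- easy case: stay inside the month
    have e : add_days y m d 1 = (y, m, d + 1) := by
      simp only [add_days]
      rw [loop1_exit _ _ _ _ (by omega)]
      simp only []
      rw [loop2_exit _ _ _ _ (by omega)]
    rw [e]
    dsimp only
    refine ⟨⟨hy, hm1, hm2, by omega, by omega⟩, ?_⟩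
    rw [pvOrdinal_eq, pvOrdinal_eq]; ring
  · -- last day of a month other than December
    obtain ⟨f, hf⟩ : ∃ f : Nat, (d + 1).natAbs + m.natAbs + 64 = f + 1 := ⟨(d + 1).natAbs + m.natAbs + 63, by omega⟩
    have hdim2 := dim_eq y (m + 1) (by omega) (by omega)
    have hge2 := dim_ge y (m + 1) (by omega) (by omega)
    have e : add_days y m d 1 = (y, m + 1, 1) := by
      simp only [add_days]
      rw [hf]
      rw [show add_days_loop1 (f + 1) y m (d + 1)
            = add_days_loop1 f y (m + 1) (d + 1 - days_in_month y m) from by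
          simp only [add_days_loop1, if_pos (show d + 1 > days_in_month y m by omega)]
          rw [if_neg (show ¬ m + 1 > 12 by omega)]]
      rw [show d + 1 - days_in_month y m = 1 by omega, loop1_exit _ _ _ _ (by omega)]
      simp only []
      rw [loop2_exit _ _ _ _ (by omega)]
    rw [e]
    dsimp only
    refine ⟨⟨hy, by omega, by omega, by omega, by omega⟩, ?_⟩
    rw [pvOrdinal_eq, pvOrdinal_eq,
      show min (max (m + 1) 1) 13 = m + 1 by omega, show min (max m 1) 13 = m by omega,
      mp_step y m hm1 hm2]
    omega
  · -- December 31st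
    have hd31 : pvDim y 12 = 31 := by unfold pvDim; norm_num
    subst hm
    obtain ⟨f, hf⟩ : ∃ f : Nat, (d + 1).natAbs + (12 : Int).natAbs + 64 = f + 1 := ⟨(d + 1).natAbs + (12 : Int).natAbs + 63, by omega⟩
    have hdim2 := dim_eq (y + 1) 1 (by omega) (by omega)
    have hge2 := dim_ge (y + 1) 1 (by omega) (by omega)
    have e : add_days y 12 d 1 = (y + 1, 1, 1) := by
      simp only [add_days]
      rw [hf]
      rw [show add_days_loop1 (f + 1) y 12 (d + 1)
            = add_days_loop1 f (y + 1) 1 (d + 1 - days_in_month y 12) from by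
          simp only [add_days_loop1, if_pos (show d + 1 > days_in_month y 12 by omega)]
          rw [if_pos (show (12 : Int) + 1 > 12 by norm_num)]]
      rw [show d + 1 - days_in_month y 12 = 1 by omega, loop1_exit _ _ _ _ (by omega)]
      simp only []
      rw [loop2_exit _ _ _ _ (by omega)]
    rw [e]
    dsimp only
    refine ⟨⟨by omega, by omega, by omega, by omega, by omega⟩, ?_⟩
    rw [pvOrdinal_eq, pvOrdinal_eq,
      show min (max (1 : Int) 1) 13 = 1 by omega, show min (max (12 : Int) 1) 13 = 12 by omega,
      mp_one, mp_twelve, ys_succ y hy]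
    split_ifs <;> omega

def pvW (w : Int) (n : Nat) : Int :=
  ((List.range n).countP (fun (k : Nat) => decide ((w + (k : Int)) % 7 < 5)) : Int)

theorem pvW_zero (w : Int) : pvW w 0 = 0 := rfl

theorem pvW_succ_head (w : Int) (n : Nat) :
    pvW w (n + 1) = (if w % 7 < 5 then 1 else 0) + pvW (w + 1) n := by
  unfold pvW
  rw [List.range_succ_eq_map, List.countP_cons, List.countP_map]
  have hc : ((List.range n).countP ((fun (k : Nat) => decide ((w + (k : Int)) % 7 < 5)) ∘ (· + 1)))
      = (List.range n).countP (fun (k : Nat) => decide ((w + 1 + (k : Int)) % 7 < 5)) := by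
    apply List.countP_congr
    intro k _
    simp only [Function.comp]
    congr 1
    · push_cast; ring_nf
  rw [hc]
  by_cases h : w % 7 < 5 <;> simp [h] <;> push_cast <;> omega

theorem pvW_succ_tail (w : Int) (n : Nat) :
    pvW w (n + 1) = pvW w n + (if (w + (n : Int)) % 7 < 5 then 1 else 0) := by
  unfold pvW
  rw [List.range_succ, List.countP_append]
  by_cases h : (w + (n : Int)) % 7 < 5 <;> simp [h]

theorem pvW_mod (w : Int) (n : Nat) : pvW (w % 7) n = pvW w n := by
  unfold pvW
  have hp : (fun (k : Nat) => decide ((w % 7 + (k : Int)) % 7 < 5))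
      = (fun (k : Nat) => decide ((w + (k : Int)) % 7 < 5)) := by
    funext k
    exact decide_eq_decide.mpr (by omega)
  rw [hp]

theorem countP_full_week (a : Int) :
    ((List.range 7).countP (fun (k : Nat) => decide ((a + (k : Int)) % 7 < 5)) : Int) = 5 := by
  have hb : 0 ≤ a % 7 ∧ a % 7 < 7 := ⟨Int.emod_nonneg a (by norm_num), Int.emod_lt_of_pos a (by norm_num)⟩
  have hp : (fun (k : Nat) => decide ((a + (k : Int)) % 7 < 5))
      = (fun (k : Nat) => decide ((a % 7 + (k : Int)) % 7 < 5)) := by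
    funext k
    exact decide_eq_decide.mpr (by omega)
  rw [hp]
  set r := a % 7 with hr
  clear_value r
  obtain ⟨h0, h7⟩ := hb
  interval_cases r <;> decide

theorem pvW_window (w : Int) (n : Nat) : pvW w (n + 7) = pvW w n + 5 := by
  unfold pvW
  rw [List.range_add, List.countP_append, List.countP_map]
  have hc : ((List.range 7).countP ((fun (k : Nat) => decide ((w + (k : Int)) % 7 < 5)) ∘ (n + ·)))
      = (List.range 7).countP (fun (k : Nat) => decide ((w + (n : Int) + (k : Int)) % 7 < 5)) := by
    apply List.countP_congr
    intro k _
    simp only [Function.comp]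
    congr 1
    · push_cast; ring_nf
  rw [hc]
  have := countP_full_week (w + (n : Int))
  push_cast
  omega

theorem pvW_div (w : Int) : ∀ (q r : Nat), pvW w (7 * q + r) = 5 * (q : Int) + pvW w r := by
  intro q
  induction q with
  | zero => intro r; simp
  | succ k ih =>
    intro r
    have : 7 * (k + 1) + r = (7 * k + r) + 7 := by omega
    rw [this, pvW_window, ih]
    push_cast
    ring

theorem wb_loop_eq : ∀ (fuel : Nat) (count cy cm cd ey em ed : Int),
    pvValidDate cy cm cd →
    (pvOrdinal ey em ed - pvOrdinal cy cm cd).toNat < fuel →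
    wb_loop fuel count (cy, cm, cd) ey em ed
      = count + pvW (pvOrdinal cy cm cd - 1) (pvOrdinal ey em ed - pvOrdinal cy cm cd).toNat := by
  intro fuel
  induction fuel with
  | zero => intro _ _ _ _ _ _ _ _ h; exact absurd h (by omega)
  | succ f ih =>
    intro count cy cm cd ey em ed hv hfu
    simp only [wb_loop, days_between, to_days_eq]
    by_cases hpos : pvOrdinal ey em ed - pvOrdinal cy cm cd > 0
    · rw [if_pos hpos]
      obtain ⟨hvn, hon⟩ := add_days_one cy cm cd hv
      rcases hsplit : add_days cy cm cd 1 with ⟨ny, nm, nd⟩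
      rw [hsplit] at hvn hon
      simp only at hvn hon
      rw [ih _ ny nm nd ey em ed hvn (by omega), hon, weekday_eq cy cm cd hv]
      have hn : (pvOrdinal ey em ed - pvOrdinal cy cm cd).toNat
          = ((pvOrdinal ey em ed - (pvOrdinal cy cm cd + 1)).toNat) + 1 := by omega
      rw [hn, pvW_succ_head, show pvOrdinal cy cm cd - 1 + 1 = pvOrdinal cy cm cd by ring]
      by_cases hw : (pvOrdinal cy cm cd - 1) % 7 < 5 <;> simp [hw] <;> omega
    · rw [if_neg hpos, show (pvOrdinal ey em ed - pvOrdinal cy cm cd).toNat = 0 by omega,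
        pvW_zero]
      ring

theorem rem_fold (w : Int) : ∀ r : Nat,
    (PySem.List.pyRange 0 (r : Int) 1).foldl
        (fun acc k => acc + (if PySem.Int.mod (w + k) 7 < 5 then 1 else 0)) 0 = pvW w r := by
  intro r
  induction r with
  | zero => rw [PySem.List.pyRange_one_eq_nil (by omega)]; rfl
  | succ n ihr =>
    rw [show ((n + 1 : Nat) : Int) = (n : Int) + 1 by push_cast; ring,
      PySem.List.pyRange_one_succ_right (by omega), List.foldl_append, ihr]
    simp only [List.foldl, pvmd7]
    rw [pvW_succ_tail]

theorem alt_eq (y1 m1 d1 y2 m2 d2 : Int) :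
    workdays_between_alt y1 m1 d1 y2 m2 d2
      = if pvOrdinal y2 m2 d2 - pvOrdinal y1 m1 d1 ≤ 0 then 0
        else pvW (pvOrdinal y1 m1 d1 - 1) (pvOrdinal y2 m2 d2 - pvOrdinal y1 m1 d1).toNat := by
  simp only [workdays_between_alt]
  by_cases h : pvOrdinal y2 m2 d2 - pvOrdinal y1 m1 d1 ≤ 0
  · rw [if_pos h, if_pos h]
  · rw [if_neg h, if_neg h]
    set o1 := pvOrdinal y1 m1 d1
    set o2 := pvOrdinal y2 m2 d2
    set n := o2 - o1 with hn
    have hr : PySem.Int.mod n 7 = (((n.toNat % 7 : Nat)) : Int) := by rw [pvmd7]; omega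
    rw [hr, rem_fold, pvmd7, pvW_mod, pvfd7]
    have hq : n / 7 = ((n.toNat / 7 : Nat) : Int) := by omega
    rw [hq]
    have := pvW_div (o1 - 1) (n.toNat / 7) (n.toNat % 7)
    rw [show 7 * (n.toNat / 7) + n.toNat % 7 = n.toNat by omega] at this
    omega

theorem mp_bounds (y mm : Int) (h1 : 1 ≤ mm) (h2 : mm ≤ 13) :
    0 ≤ pvMP y mm ∧ pvMP y mm ≤ 366 := by
  interval_cases mm <;> simp [pvMP, pvCum, PySem.List.pyGetD_ofNat'] <;>
    try (split <;> omega)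

theorem ord_upper (y m d : Int) (hy : y ≤ 2147483649) (hd : d ≤ 2147483648) :
    pvOrdinal y m d ≤ 800000000000 := by
  rw [pvOrdinal_eq]
  have h2 := mp_bounds y (min (max m 1) 13) (by omega) (by omega)
  have h3 : pvYS y ≤ 790000000000 := by
    unfold pvYS
    split_ifs with h
    · omega
    · omega
  omega

theorem ord_lower (y m d : Int) (hv : pvValidDate y m d) : 1 ≤ pvOrdinal y m d := by
  obtain ⟨hy, hm1, hm2, hd1, hd2⟩ := hv
  rw [pvOrdinal_eq]
  have h2 := mp_bounds y (min (max m 1) 13) (by omega) (by omega)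
  have h3 : 0 ≤ pvYS y := by
    unfold pvYS
    rw [if_pos hy]
    omega
  omega

theorem workdays_between_spec' (y1 m1 d1 y2 m2 d2 : Int)
    (hdom : Dom_workdays_between y1 m1 d1 y2 m2 d2)
    (hpre : Pre_workdays_between y1 m1 d1 y2 m2 d2) :
    workdays_between y1 m1 d1 y2 m2 d2 = workdays_between_alt y1 m1 d1 y2 m2 d2 := by
  rw [alt_eq]
  unfold workdays_between
  rcases hpre with hle | ⟨hv1, hv2⟩
  · rw [if_pos (by omega)]
    obtain ⟨f, hf⟩ : ∃ f : Nat, (2 : Nat) ^ 60 = f + 1 := ⟨2 ^ 60 - 1, by norm_num⟩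
    rw [hf]
    simp only [wb_loop, days_between, to_days_eq]
    rw [if_neg (by omega)]
  · unfold Dom_workdays_between at hdom
    simp only [pvDomInt, Bool.and_eq_true, decide_eq_true_eq] at hdom
    obtain ⟨⟨⟨⟨⟨hb1, hb2⟩, hb3⟩, hb4⟩, hb5⟩, hb6⟩ := hdom
    have hub := ord_upper y2 m2 d2 (by omega) (by omega)
    have hlb := ord_lower y1 m1 d1 hv1
    rw [wb_loop_eq (2 ^ 60) 0 y1 m1 d1 y2 m2 d2 hv1 (by norm_num; omega)]
    by_cases hc : pvOrdinal y2 m2 d2 - pvOrdinal y1 m1 d1 ≤ 0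
    · rw [if_pos hc, show (pvOrdinal y2 m2 d2 - pvOrdinal y1 m1 d1).toNat = 0 by omega, pvW_zero]
      ring
    · rw [if_neg hc]
      ring

-- ===== VERDICT (by name: the statement is the Claim_ definition above) =====
theorem workdays_between_spec : Claim_equal_workdays_between := by
  intro y1 m1 d1 y2 m2 d2 hdom hpre
  unfold Spec_workdays_between
  exact workdays_between_spec' y1 m1 d1 y2 m2 d2 hdom hpre
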